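-- pv_equiv track=rewrite | github.com/pedromorgan/pyspread | src/model/model.py | _sorted_keys
-- ===== SOURCE A (Python) =====
-- from builtins import filter
--
-- def _sorted_keys(keys, startkey, reverse=False):
--     """Generator that yields sorted keys starting with startkey
--
--     Parameters
--     ----------
--
--     keys: Iterable of tuple/list
--     \tKey sequence that is sorted
--     startkey: Tuple/list
--     \tFirst key to be yielded
--     reverse: Bool
--     \tSort direction reversed if True
--
--     """
--
--     def tuple_key(t):
--         return t[::-1]
--
--     if reverse:
--         def tuple_cmp(t):
--             return t[::-1] > startkey[::-1]
--     else:
--         def tuple_cmp(t):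
--             return t[::-1] < startkey[::-1]
--
--     searchkeys = sorted(keys, key=tuple_key, reverse=reverse)
--     searchpos = sum(1 for _ in filter(tuple_cmp, searchkeys))
--
--     searchkeys = searchkeys[searchpos:] + searchkeys[:searchpos]
--
--     for key in searchkeys:
--         yield key
-- ===== SOURCE B (Python) =====
-- def _sorted_keys(keys, startkey, reverse=False):
--     """Yields sorted keys rotated to begin at startkey: one sort with a
--     composite key (wrap-around flag, reversed tuple); no counting or slicing."""
--     sk = startkey[::-1]
--     if reverse:
--         def composite(t):
--             r = t[::-1]
--             return (r <= sk, r)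
--     else:
--         def composite(t):
--             r = t[::-1]
--             return (r < sk, r)
--     yield from sorted(keys, key=composite, reverse=reverse)
-- ===== Notes on version B (the rewrite author's own statement) =====
-- stated objective: alternative
-- what changed: Instead of sorting, counting the keys that precede startkey and rotating by slicing, B performs a single sort under a composite key (wrap-around flag, reversed tuple), so the rotated order falls out of one sort with no counting pass or slice concatenation.
import Mathlib
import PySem

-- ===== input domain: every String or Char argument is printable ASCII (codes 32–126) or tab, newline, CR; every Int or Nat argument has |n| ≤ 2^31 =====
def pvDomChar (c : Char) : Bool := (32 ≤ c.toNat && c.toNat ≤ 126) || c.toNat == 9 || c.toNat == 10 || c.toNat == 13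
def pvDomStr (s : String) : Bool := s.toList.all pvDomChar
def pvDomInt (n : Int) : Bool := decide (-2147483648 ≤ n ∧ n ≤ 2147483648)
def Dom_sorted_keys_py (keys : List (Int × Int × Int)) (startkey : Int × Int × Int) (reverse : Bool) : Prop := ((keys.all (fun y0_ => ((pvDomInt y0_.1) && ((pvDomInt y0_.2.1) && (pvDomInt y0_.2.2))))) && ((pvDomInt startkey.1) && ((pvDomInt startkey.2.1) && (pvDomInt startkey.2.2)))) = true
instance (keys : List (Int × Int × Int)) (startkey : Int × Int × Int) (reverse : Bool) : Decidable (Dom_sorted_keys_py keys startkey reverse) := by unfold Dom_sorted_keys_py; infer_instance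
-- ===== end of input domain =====

-- B replaces A's count-matches-and-slice rotation by a single sort under a composite
-- (wrap-around flag, reversed tuple) key; return-value equivalence (both Pythons are generators).

-- t[::-1] on a 3-tuple of ints, as a lexicographically ordered value (Python compares
-- tuples lexicographically; `Lex` gives exactly that order, pointwise `<` on Prod does not).
def pvRevKey (t : Int × Int × Int) : Lex (Int × Lex (Int × Int)) :=
  toLex (t.2.2, toLex (t.2.1, t.1))

-- ===== PORT A =====
def sorted_keys_py (keys : List (Int × Int × Int)) (startkey : Int × Int × Int) (reverse : Bool) : List (Int × Int × Int) :=
  -- tuple_cmp, chosen by `reverse` exactly as in A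
  let tuple_cmp : (Int × Int × Int) → Bool :=
    if reverse then fun t => decide (pvRevKey startkey < pvRevKey t)
    else fun t => decide (pvRevKey t < pvRevKey startkey)
  let searchkeys := PySem.List.sorted keys pvRevKey reverse
  -- sum(1 for _ in filter(tuple_cmp, searchkeys))
  let searchpos : Int := (searchkeys.countP tuple_cmp : Nat)
  PySem.List.slice searchkeys (some searchpos) none ++ PySem.List.slice searchkeys none (some searchpos)

-- ===== PORT B =====
def sorted_keys_py_alt (keys : List (Int × Int × Int)) (startkey : Int × Int × Int) (reverse : Bool) : List (Int × Int × Int) :=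
  -- sk = startkey[::-1]; composite key (flag, r) — Python orders bools False < True,
  -- matching Lean's Bool order; sorted2 is sorted with a 2-tuple key
  let sk := pvRevKey startkey
  if reverse then
    PySem.List.sorted2 keys (fun t => decide (pvRevKey t ≤ sk)) pvRevKey true
  else
    PySem.List.sorted2 keys (fun t => decide (pvRevKey t < sk)) pvRevKey false

-- ===== PRECONDITION & SPEC =====
def Spec_sorted_keys_py (keys : List (Int × Int × Int)) (startkey : Int × Int × Int) (reverse : Bool) (out : List (Int × Int × Int)) : Prop := out = sorted_keys_py_alt keys startkey reverse
instance (keys : List (Int × Int × Int)) (startkey : Int × Int × Int) (reverse : Bool) (out : List (Int × Int × Int)) : Decidable (Spec_sorted_keys_py keys startkey reverse out) := by unfold Spec_sorted_keys_py; infer_instance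

-- ===== CLAIM (what is proved, stated in full; the proofs are below) =====
def Claim_equal_sorted_keys_py : Prop := ∀ (keys : List (Int × Int × Int)) (startkey : Int × Int × Int) (reverse : Bool), Dom_sorted_keys_py keys startkey reverse → Spec_sorted_keys_py keys startkey reverse (sorted_keys_py keys startkey reverse)

-- ===== LEMMAS AND PROOFS =====

theorem pvRevKey_injective : Function.Injective pvRevKey := by
  intro a b h
  obtain ⟨a1, a2, a3⟩ := a
  obtain ⟨b1, b2, b3⟩ := b
  simp only [pvRevKey, toLex_inj, Prod.mk.injEq] at h
  simp [h.1, h.2.1, h.2.2]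

-- In a list where the Bool predicate q can only turn from true to false along the list,
-- `take (countP q)` is exactly the q-part and `drop (countP q)` the rest.
theorem take_drop_countP {α : Type} (q : α → Bool) :
    ∀ (l : List α), l.Pairwise (fun a b => q b = true → q a = true) →
      l.take (l.countP q) = l.filter q ∧ l.drop (l.countP q) = l.filter (fun x => !q x)
  | [], _ => by simp
  | a :: t, h => by
    rcases List.pairwise_cons.mp h with ⟨ha, ht⟩
    by_cases hqa : q a = true
    · have iht := take_drop_countP q t ht
      simp [hqa, iht.1, iht.2]
    · have hall : ∀ b ∈ t, ¬ q b = true := fun b hb hq => hqa (ha b hb hq)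
      have h0 : (a :: t).countP q = 0 := by
        simp only [List.countP_eq_zero]
        intro b hb
        rcases List.mem_cons.mp hb with rfl | hb'
        · exact hqa
        · exact hall b hb'
      rw [h0]
      constructor
      · simp only [List.take_zero]
        symm
        rw [List.filter_eq_nil_iff]
        intro b hb
        rcases List.mem_cons.mp hb with rfl | hb'
        · exact hqa
        · exact hall b hb'
      · simp only [List.drop_zero]
        symm
        rw [List.filter_eq_self]
        intro b hb
        rcases List.mem_cons.mp hb with rfl | hb'
        · simpa using hqa
        · simpa using hall b hb'

-- A's rotation of the sorted list, described by filters.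
theorem rotA {α κ : Type} [LinearOrder κ] (k : α → κ) (q : α → Bool)
    (hdc : ∀ a b, k a ≤ k b → q b = true → q a = true) (xs : List α) :
    (PySem.List.sorted xs k false).drop ((PySem.List.sorted xs k false).countP q)
      ++ (PySem.List.sorted xs k false).take ((PySem.List.sorted xs k false).countP q)
    = (PySem.List.sorted xs k false).filter (fun x => !q x)
      ++ (PySem.List.sorted xs k false).filter q := by
  have hp : (PySem.List.sorted xs k false).Pairwise (fun a b => q b = true → q a = true) :=
    (PySem.List.sorted_pairwise xs k).imp (fun hab => hdc _ _ hab)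
  obtain ⟨h1, h2⟩ := take_drop_countP q _ hp
  rw [h1, h2]

-- Sorting under the lexicographic (flag, key) pair = the ¬flag part then the flag part
-- of the plain sort.
theorem sorted_lex_eq_filter_append {α κ : Type} [LinearOrder κ] (k : α → κ)
    (hk : Function.Injective k) (q : α → Bool) (xs : List α) :
    PySem.List.sorted xs (fun t => toLex ((q t, k t) : Bool × κ)) false
      = (PySem.List.sorted xs k false).filter (fun x => !q x)
        ++ (PySem.List.sorted xs k false).filter q := by
  have hinj : Function.Injective (fun t => toLex ((q t, k t) : Bool × κ)) := by
    intro a b h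
    exact hk (congrArg (fun x => (ofLex x).2) h)
  apply PySem.List.eq_of_perm_of_pairwise_le_of_injective _ hinj
  · have hperm0 : ((PySem.List.sorted xs k false).filter (fun x => !q x)
        ++ (PySem.List.sorted xs k false).filter q).Perm (PySem.List.sorted xs k false) := by
      simpa [Bool.not_not] using List.filter_append_perm (fun x => !q x) (PySem.List.sorted xs k false)
    exact ((PySem.List.sorted_perm xs _ false).trans
      ((PySem.List.sorted_perm xs k false).symm)).trans hperm0.symm
  · exact PySem.List.sorted_pairwise xs _
  · rw [List.pairwise_append]
    refine ⟨?_, ?_, ?_⟩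
    · refine List.Pairwise.imp_of_mem ?_ ((PySem.List.sorted_pairwise xs k).filter _)
      intro a b ha hb hr
      have hqa : q a = false := by
        simpa using (List.mem_filter.mp ha).2
      have hqb : q b = false := by
        simpa using (List.mem_filter.mp hb).2
      exact Prod.Lex.toLex_le_toLex.mpr (Or.inr ⟨by rw [hqa, hqb], hr⟩)
    · refine List.Pairwise.imp_of_mem ?_ ((PySem.List.sorted_pairwise xs k).filter _)
      intro a b ha hb hr
      have hqa : q a = true := (List.mem_filter.mp ha).2
      have hqb : q b = true := (List.mem_filter.mp hb).2
      exact Prod.Lex.toLex_le_toLex.mpr (Or.inr ⟨by rw [hqa, hqb], hr⟩)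
    · intro a ha b hb
      have hqa : q a = false := by
        simpa using (List.mem_filter.mp ha).2
      have hqb : q b = true := (List.mem_filter.mp hb).2
      exact Prod.Lex.toLex_le_toLex.mpr (Or.inl (by rw [hqa, hqb]; exact Bool.false_lt_true))

-- descending sort = ascending sort under the dual order
theorem sorted_true_eq_dual {α κ : Type} [LinearOrder κ] (k : α → κ) (xs : List α) :
    PySem.List.sorted xs k true
      = PySem.List.sorted xs (fun t => OrderDual.toDual (k t)) false := by
  rw [PySem.List.sorted_rev_eq_foldl_insertBy, PySem.List.sorted_eq_foldl_insertBy]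
  have hfun : (fun (a b : α) => decide (OrderDual.toDual (k a) < OrderDual.toDual (k b)))
      = fun a b => decide (k b < k a) := by
    funext a b
    rw [decide_eq_decide]
    exact OrderDual.toDual_lt_toDual
  rw [hfun]

-- sorting is invariant under replacing the key by one inducing the same strict order
theorem sorted_key_congr {α κ₁ κ₂ : Type} [LT κ₁] [DecidableLT κ₁] [LT κ₂] [DecidableLT κ₂]
    (xs : List α) (k1 : α → κ₁) (k2 : α → κ₂)
    (h : ∀ a b, k1 a < k1 b ↔ k2 a < k2 b) :
    PySem.List.sorted xs k1 false = PySem.List.sorted xs k2 false := by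
  rw [PySem.List.sorted_eq_foldl_insertBy, PySem.List.sorted_eq_foldl_insertBy]
  have hfun : (fun (a b : α) => decide (k1 a < k1 b)) = fun a b => decide (k2 a < k2 b) := by
    funext a b
    rw [decide_eq_decide]
    exact h a b
  rw [hfun]

-- sorted2 is sorted under the lexicographic pair key
theorem sorted2_eq_sorted_lex {α κ₁ κ₂ : Type} [LinearOrder κ₁] [LinearOrder κ₂]
    (xs : List α) (k1 : α → κ₁) (k2 : α → κ₂) (rev : Bool) :
    PySem.List.sorted2 xs k1 k2 rev
      = PySem.List.sorted xs (fun t => toLex ((k1 t, k2 t) : κ₁ × κ₂)) rev := by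
  have hlt : (fun (a b : α) => (decide (k1 a < k1 b) || (!decide (k1 b < k1 a) && decide (k2 a < k2 b))))
      = fun a b => decide (toLex ((k1 a, k2 a) : κ₁ × κ₂) < toLex (k1 b, k2 b)) := by
    funext a b
    rcases lt_trichotomy (k1 a) (k1 b) with h | h | h
    · simp [Prod.Lex.toLex_lt_toLex, h]
    · simp [Prod.Lex.toLex_lt_toLex, h, lt_irrefl]
    · simp [Prod.Lex.toLex_lt_toLex, asymm h, h, h.ne']
  cases rev
  · rw [PySem.List.sorted_eq_foldl_insertBy]
    simp only [PySem.List.sorted2, if_neg (by decide : ¬ (false = true))]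
    rw [hlt]
  · rw [PySem.List.sorted_rev_eq_foldl_insertBy]
    simp only [PySem.List.sorted2, if_pos rfl]
    have hfun : (fun (a b : α) => (decide (k1 b < k1 a) || (!decide (k1 a < k1 b) && decide (k2 b < k2 a))))
        = fun a b => decide (toLex ((k1 b, k2 b) : κ₁ × κ₂) < toLex (k1 a, k2 a)) := by
      funext a b
      exact congrFun (congrFun hlt b) a
    rw [hfun, if_pos trivial]

-- ===== VERDICT (by name: the statement is the Claim_ definition above) =====
theorem sorted_keys_py_spec : Claim_equal_sorted_keys_py := by
  intro keys startkey reverse _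
  cases reverse
  · -- reverse = False
    simp only [Spec_sorted_keys_py, sorted_keys_py, sorted_keys_py_alt, Bool.false_eq_true,
      if_false]
    rw [PySem.List.slice_from _ (Int.natCast_nonneg _), PySem.List.slice_to _ (Int.natCast_nonneg _),
      Int.toNat_natCast]
    rw [sorted2_eq_sorted_lex,
      sorted_lex_eq_filter_append pvRevKey pvRevKey_injective
        (fun t => decide (pvRevKey t < pvRevKey startkey)) keys]
    refine rotA pvRevKey _ ?_ keys
    intro a b hab hb
    simp only [decide_eq_true_eq] at hb ⊢
    exact lt_of_le_of_lt hab hb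
  · -- reverse = True
    simp only [Spec_sorted_keys_py, sorted_keys_py, sorted_keys_py_alt, if_true]
    have hkdinj : Function.Injective (fun t => OrderDual.toDual (pvRevKey t)) := by
      intro a b h
      exact pvRevKey_injective (OrderDual.toDual.injective h)
    have hiff : ∀ a b : Int × Int × Int,
        OrderDual.toDual (toLex ((decide (pvRevKey a ≤ pvRevKey startkey), pvRevKey a)))
          < OrderDual.toDual (toLex ((decide (pvRevKey b ≤ pvRevKey startkey), pvRevKey b)))
        ↔ toLex (((decide (pvRevKey startkey < pvRevKey a) : Bool), OrderDual.toDual (pvRevKey a)))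
          < toLex ((decide (pvRevKey startkey < pvRevKey b), OrderDual.toDual (pvRevKey b))) := by
      intro a b
      by_cases ha : pvRevKey a ≤ pvRevKey startkey
        <;> by_cases hb : pvRevKey b ≤ pvRevKey startkey
      · have ha' : ¬ pvRevKey startkey < pvRevKey a := not_lt.mpr ha
        have hb' : ¬ pvRevKey startkey < pvRevKey b := not_lt.mpr hb
        simp [Prod.Lex.toLex_lt_toLex, OrderDual.toDual_lt_toDual, ha, hb, ha', hb']
      · have ha' : ¬ pvRevKey startkey < pvRevKey a := not_lt.mpr ha
        have hb' : pvRevKey startkey < pvRevKey b := not_le.mp hb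
        simp [Prod.Lex.toLex_lt_toLex, OrderDual.toDual_lt_toDual, ha, hb, ha', hb']
      · have ha' : pvRevKey startkey < pvRevKey a := not_le.mp ha
        have hb' : ¬ pvRevKey startkey < pvRevKey b := not_lt.mpr hb
        simp [Prod.Lex.toLex_lt_toLex, OrderDual.toDual_lt_toDual, ha, hb, ha', hb']
      · have ha' : pvRevKey startkey < pvRevKey a := not_le.mp ha
        have hb' : pvRevKey startkey < pvRevKey b := not_le.mp hb
        simp [Prod.Lex.toLex_lt_toLex, OrderDual.toDual_lt_toDual, ha, hb, ha', hb']
    rw [sorted2_eq_sorted_lex, sorted_true_eq_dual pvRevKey keys, sorted_true_eq_dual _ keys]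
    rw [PySem.List.slice_from _ (Int.natCast_nonneg _), PySem.List.slice_to _ (Int.natCast_nonneg _),
      Int.toNat_natCast]
    rw [
      sorted_key_congr keys _
        (fun t => toLex (((decide (pvRevKey startkey < pvRevKey t) : Bool),
          OrderDual.toDual (pvRevKey t)))) hiff,
      sorted_lex_eq_filter_append _ hkdinj
        (fun t => decide (pvRevKey startkey < pvRevKey t)) keys]
    refine rotA _ _ ?_ keys
    intro a b hab hb
    simp only [decide_eq_true_eq] at hb ⊢
    exact lt_of_lt_of_le hb (OrderDual.toDual_le_toDual.mp hab)
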